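-- pv_equiv track=rewrite | github.com/GermanDemidov/NIR2 | double_check/count_bp.py | count_bp
-- ===== SOURCE A (Python) =====
-- def count_bp(adj_list_1, adj_list_2):
--     result = 0
--     set_1, set_2 = set(adj_list_1), set(adj_list_2)
--     for adj_l, adj_r in set_1:
--         if (adj_l, adj_r) not in set_2 or (adj_r, adj_l) not in set_2:
--             result += 1
--     for adj_l, adj_r in set_2:
--         if (adj_l, adj_r) not in set_1 or (adj_r, adj_l) not in set_1:
--             result += 1
--     return result
-- ===== SOURCE B (Python) =====
-- def count_bp(adj_list_1, adj_list_2):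
--     # Group edges by their canonical (sorted) endpoint pair; a group's edges from one
--     # side are all counted unless the OTHER side holds both orientations of the key.
--     groups = {}
--     for a, b in adj_list_1:
--         key = (a, b) if a <= b else (b, a)
--         d1, d2 = groups.setdefault(key, (set(), set()))
--         d1.add((a, b))
--     for a, b in adj_list_2:
--         key = (a, b) if a <= b else (b, a)
--         d1, d2 = groups.setdefault(key, (set(), set()))
--         d2.add((a, b))
--     total = 0
--     for (x, y), (d1, d2) in groups.items():
--         both = {(x, y), (y, x)}
--         total += (0 if d2 == both else len(d1)) + (0 if d1 == both else len(d2))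
--     return total
-- ===== Notes on version B (the rewrite author's own statement) =====
-- stated objective: alternative
-- what changed: Instead of testing each edge's two orientations for membership in the other set, B groups all edges of both inputs into one dict keyed by the canonical (sorted) endpoint pair and sums per-group contributions: a group's edges from one side all count unless the other side's group holds both orientations.
import Mathlib
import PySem

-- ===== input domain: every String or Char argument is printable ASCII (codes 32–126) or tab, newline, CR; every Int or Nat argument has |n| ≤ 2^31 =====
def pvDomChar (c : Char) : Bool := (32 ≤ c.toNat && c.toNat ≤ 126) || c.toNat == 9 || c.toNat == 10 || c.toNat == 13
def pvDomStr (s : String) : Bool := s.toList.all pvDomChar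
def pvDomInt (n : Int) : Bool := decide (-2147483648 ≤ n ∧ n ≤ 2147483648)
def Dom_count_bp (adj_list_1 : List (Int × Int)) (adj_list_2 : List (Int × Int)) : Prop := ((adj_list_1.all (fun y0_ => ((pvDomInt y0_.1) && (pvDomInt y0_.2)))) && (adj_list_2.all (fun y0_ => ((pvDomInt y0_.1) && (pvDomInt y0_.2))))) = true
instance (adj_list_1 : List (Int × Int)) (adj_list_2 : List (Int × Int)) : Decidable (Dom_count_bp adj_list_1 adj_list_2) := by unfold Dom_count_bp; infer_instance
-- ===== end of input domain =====

-- ===== PORT A =====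
-- A counts, for each side, the distinct edges whose pair or reversed pair is missing from the other set.
def count_bp (adj_list_1 : List (Int × Int)) (adj_list_2 : List (Int × Int)) : Int :=
  let set_1 := PySem.Set.ofList adj_list_1
  let set_2 := PySem.Set.ofList adj_list_2
  let result : Int :=
    set_1.foldl (fun result p =>
      if !(PySem.Set.contains set_2 (p.1, p.2)) || !(PySem.Set.contains set_2 (p.2, p.1))
      then result + 1 else result) 0
  set_2.foldl (fun result p =>
    if !(PySem.Set.contains set_1 (p.1, p.2)) || !(PySem.Set.contains set_1 (p.2, p.1))
    then result + 1 else result) result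

-- ===== PORT B =====
-- B: group all edges of both inputs by the canonical (sorted) endpoint pair into one dict,
-- then sum per-group contributions; no membership tests of one set in the other.
def pvCanon (p : Int × Int) : Int × Int := if p.1 ≤ p.2 then p else (p.2, p.1)

def count_bp_alt (adj_list_1 : List (Int × Int)) (adj_list_2 : List (Int × Int)) : Int :=
  let g0 : PySem.Dict (Int × Int) (PySem.Set (Int × Int) × PySem.Set (Int × Int)) := PySem.Dict.empty
  -- setdefault to an empty pair of sets, then add the edge to this side's set (in-place)
  let g1 := adj_list_1.foldl (fun d p =>
    d.modify (pvCanon p) ([], []) (fun g => (PySem.Set.add g.1 p, g.2))) g0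
  let g2 := adj_list_2.foldl (fun d p =>
    d.modify (pvCanon p) ([], []) (fun g => (g.1, PySem.Set.add g.2 p))) g1
  g2.items.foldl (fun total kv =>
    let k := kv.1
    let both := PySem.Set.ofList [k, (k.2, k.1)]
    total + (if PySem.Set.equal kv.2.2 both then 0 else (PySem.Set.len kv.2.1 : Int))
          + (if PySem.Set.equal kv.2.1 both then 0 else (PySem.Set.len kv.2.2 : Int))) 0

-- ===== PRECONDITION & SPEC =====
def Spec_count_bp (adj_list_1 : List (Int × Int)) (adj_list_2 : List (Int × Int)) (out : Int) : Prop := out = count_bp_alt adj_list_1 adj_list_2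
instance (adj_list_1 : List (Int × Int)) (adj_list_2 : List (Int × Int)) (out : Int) : Decidable (Spec_count_bp adj_list_1 adj_list_2 out) := by unfold Spec_count_bp; infer_instance

-- ===== CLAIM (what is proved, stated in full; the proofs are below) =====
def Claim_equal_count_bp : Prop := ∀ (adj_list_1 : List (Int × Int)) (adj_list_2 : List (Int × Int)), Dom_count_bp adj_list_1 adj_list_2 → Spec_count_bp adj_list_1 adj_list_2 (count_bp adj_list_1 adj_list_2)

-- ===== LEMMAS AND PROOFS =====

-- what the first building loop leaves at key k
lemma getD_build1 (l : List (Int × Int))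
    (d : PySem.Dict (Int × Int) (PySem.Set (Int × Int) × PySem.Set (Int × Int))) (k : Int × Int) :
    (l.foldl (fun d p => d.modify (pvCanon p) ([], []) (fun g => (PySem.Set.add g.1 p, g.2))) d).getD k ([], [])
    = (PySem.Set.update (d.getD k ([], [])).1 (l.filter (fun p => pvCanon p == k)),
       (d.getD k ([], [])).2) := by
  induction l generalizing d with
  | nil => simp [PySem.Set.update]
  | cons p l ih =>
      simp only [List.foldl_cons, List.filter_cons, ih]
      by_cases h : pvCanon p = k
      · simp [h, PySem.Dict.getD_modify_self, PySem.Set.update_cons]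
      · have h' : k ≠ pvCanon p := fun e => h e.symm
        simp [h, PySem.Dict.getD_modify_of_ne _ _ _ h']

-- what the second building loop leaves at key k
lemma getD_build2 (l : List (Int × Int))
    (d : PySem.Dict (Int × Int) (PySem.Set (Int × Int) × PySem.Set (Int × Int))) (k : Int × Int) :
    (l.foldl (fun d p => d.modify (pvCanon p) ([], []) (fun g => (g.1, PySem.Set.add g.2 p))) d).getD k ([], [])
    = ((d.getD k ([], [])).1,
       PySem.Set.update (d.getD k ([], [])).2 (l.filter (fun p => pvCanon p == k))) := by
  induction l generalizing d with
  | nil => simp [PySem.Set.update]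
  | cons p l ih =>
      simp only [List.foldl_cons, List.filter_cons, ih]
      by_cases h : pvCanon p = k
      · simp [h, PySem.Dict.getD_modify_self, PySem.Set.update_cons]
      · have h' : k ≠ pvCanon p := fun e => h e.symm
        simp [h, PySem.Dict.getD_modify_of_ne _ _ _ h']

-- canonicalisation facts
lemma canon_mem (p : Int × Int) : pvCanon p = p ∨ pvCanon p = (p.2, p.1) := by
  unfold pvCanon; split_ifs <;> simp

lemma canon_fst_le (p : Int × Int) : (pvCanon p).1 ≤ (pvCanon p).2 := by
  unfold pvCanon; split_ifs with h
  · exact h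
  · simp; omega

lemma canon_self {k : Int × Int} (h : k.1 ≤ k.2) : pvCanon k = k := by
  unfold pvCanon; simp [h]

lemma canon_rev {k : Int × Int} (h : k.1 ≤ k.2) : pvCanon (k.2, k.1) = k := by
  unfold pvCanon
  by_cases h2 : k.2 ≤ k.1
  · have he : k.1 = k.2 := le_antisymm h h2
    simp only [h2, if_pos]
    cases k
    simp_all
  · simp [h2]

lemma canon_eq_iff {p k : Int × Int} (hk : k.1 ≤ k.2) :
    pvCanon p = k ↔ (p = k ∨ p = (k.2, k.1)) := by
  constructor
  · intro h
    rcases canon_mem p with h1 | h1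
    · left; rw [← h1, h]
    · right
      have : p = ((pvCanon p).2, (pvCanon p).1) := by rw [h1]
      rw [this, h]
  · rintro (rfl | rfl)
    · exact canon_self hk
    · exact canon_rev hk

-- the membership test of A at p, rewritten through the canonical key of p
lemma pred_via_canon (l : List (Int × Int)) (p : Int × Int) :
    ((p.1, p.2) ∈ l ∧ (p.2, p.1) ∈ l) ↔
    (pvCanon p ∈ l ∧ ((pvCanon p).2, (pvCanon p).1) ∈ l) := by
  rcases canon_mem p with h | h <;> rw [h] <;> simp
  tauto

-- 'd2 == {key, reversed key}' means: the other list holds both orientations of the key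
lemma equal_both_iff (l : List (Int × Int)) (k : Int × Int) (hk : k.1 ≤ k.2) :
    PySem.Set.equal (PySem.Set.ofList (l.filter (fun p => pvCanon p == k)))
      (PySem.Set.ofList [k, (k.2, k.1)]) = true
    ↔ (k ∈ l ∧ (k.2, k.1) ∈ l) := by
  rw [PySem.Set.equal_iff]
  constructor
  · intro h
    have h1 := (h k).2
    have h2 := (h (k.2, k.1)).2
    simp only [PySem.Set.mem_ofList, List.mem_filter, List.mem_cons,
      beq_iff_eq] at h1 h2
    exact ⟨(h1 (by simp)).1, (h2 (by simp)).1⟩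
  · intro ⟨h1, h2⟩ x
    simp only [PySem.Set.mem_ofList, List.mem_filter, List.mem_cons,
      beq_iff_eq]
    constructor
    · rintro ⟨-, hc⟩
      rcases (canon_eq_iff hk).1 hc with rfl | rfl <;> simp
    · rintro (rfl | ⟨rfl | h⟩)
      · exact ⟨h1, canon_self hk⟩
      · exact ⟨h2, canon_rev hk⟩
      · cases h

-- a deduplicated filtered list has the length of the filtered deduplicated list
lemma len_ofList_filter {α : Type} [BEq α] [LawfulBEq α] (l : List α) (q : α → Bool) :
    (PySem.Set.ofList (l.filter q)).length = ((PySem.Set.ofList l).filter q).length := by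
  apply List.Perm.length_eq
  rw [List.perm_ext_iff_of_nodup (PySem.Set.nodup_ofList _) ((PySem.Set.nodup_ofList l).filter q)]
  intro x
  simp [PySem.Set.mem_ofList, List.mem_filter]

-- summing 0/1 group indicators over a Nodup key list containing key p gives the indicator at p
lemma sum_indicator {α κ : Type} [DecidableEq κ] (K : List κ) (key : α → κ) (g : κ → Bool)
    (p : α) (hK : K.Nodup) (hp : key p ∈ K) :
    (K.map (fun k => if g k then (if key p = k then (1 : Int) else 0) else 0)).sum
    = (if g (key p) then (1 : Int) else 0) := by
  induction K with
  | nil => cases hp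
  | cons k K ih =>
      simp only [List.map_cons, List.sum_cons]
      rcases List.mem_cons.1 hp with rfl | hp'
      · have hnot : key p ∉ K := (List.nodup_cons.1 hK).1
        have : (K.map (fun k => if g k then (if key p = k then (1 : Int) else 0) else 0)).sum = 0 := by
          apply List.sum_eq_zero
          intro x hx
          rcases List.mem_map.1 hx with ⟨k', hk', rfl⟩
          have : key p ≠ k' := fun e => hnot (e ▸ hk')
          simp [this]
        simp [this]
      · have hne : key p ≠ k := by
          rintro rfl; exact (List.nodup_cons.1 hK).1 hp'
        rw [ih (List.nodup_cons.1 hK).2 hp']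
        simp [hne]

-- counting by a predicate on the key = summing filtered-group sizes over the distinct keys
lemma partition_count {α κ : Type} [BEq κ] [LawfulBEq κ] [DecidableEq κ] [DecidableEq α]
    (S : List α) (K : List κ) (key : α → κ) (g : κ → Bool)
    (hK : K.Nodup) (hmem : ∀ p ∈ S, key p ∈ K) :
    ((S.countP (fun p => g (key p))) : Int)
    = (K.map (fun k => if g k then ((S.filter (fun p => key p == k)).length : Int) else 0)).sum := by
  induction S with
  | nil => simp
  | cons p S ih =>
      have hmem' : ∀ q ∈ S, key q ∈ K := fun q hq => hmem q (List.mem_cons_of_mem p hq)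
      rw [List.countP_cons]
      have step : ∀ k : κ,
          (if g k then (((p :: S).filter (fun q => key q == k)).length : Int) else 0)
          = (if g k then ((S.filter (fun q => key q == k)).length : Int) else 0)
            + (if g k then (if key p = k then (1 : Int) else 0) else 0) := by
        intro k
        by_cases hg : g k
        · by_cases hpk : key p = k <;> simp [hg, hpk]
        · simp [hg]
      calc ((S.countP (fun q => g (key q)) + if g (key p) then 1 else 0 : Nat) : Int)
          = ((S.countP (fun q => g (key q)) : Int) + if g (key p) then (1 : Int) else 0) := by
            push_cast; split_ifs <;> simp
        _ = (K.map (fun k => if g k then ((S.filter (fun q => key q == k)).length : Int) else 0)).sum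
            + (K.map (fun k => if g k then (if key p = k then (1 : Int) else 0) else 0)).sum := by
            rw [ih hmem', sum_indicator K key g p hK (hmem p (List.mem_cons_self))]
        _ = _ := by
            rw [← PySem.List.sum_map_add_int]
            congr 1
            exact (List.map_congr_left fun k _ => (step k).symm)

-- A's counting loop over a side, as a countP
lemma side_countP (s t : List (Int × Int)) (a : Int) :
    s.foldl (fun result p =>
      if !(PySem.Set.contains (PySem.Set.ofList t) (p.1, p.2)) ||
         !(PySem.Set.contains (PySem.Set.ofList t) (p.2, p.1))
      then result + 1 else result) a
    = a + ((s.countP (fun p =>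
        !(decide ((p.1, p.2) ∈ t)) || !(decide ((p.2, p.1) ∈ t)))) : Int) := by
  rw [PySem.List.foldl_count_if]
  congr 1
  apply congrArg
  apply List.countP_congr
  intro p _
  simp [PySem.Set.mem_ofList]

-- membership in B's key list implies being a canonical key
lemma mem_K_le {l1 l2 : List (Int × Int)} {k : Int × Int}
    (h : k ∈ PySem.Set.ofList (l1.map pvCanon ++ l2.map pvCanon)) : k.1 ≤ k.2 := by
  rw [PySem.Set.mem_ofList, List.mem_append] at h
  rcases h with h | h <;>
    · rcases List.mem_map.1 h with ⟨p, -, rfl⟩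
      exact canon_fst_le p

-- B's result, written as a sum of per-key contributions over the distinct canonical keys
lemma alt_eq (l1 l2 : List (Int × Int)) :
    count_bp_alt l1 l2
    = ((PySem.Set.ofList (l1.map pvCanon ++ l2.map pvCanon)).map (fun k =>
        (if decide (k ∈ l2) && decide ((k.2, k.1) ∈ l2) then 0
         else (((PySem.Set.ofList l1).filter (fun p => pvCanon p == k)).length : Int))
      + (if decide (k ∈ l1) && decide ((k.2, k.1) ∈ l1) then 0
         else (((PySem.Set.ofList l2).filter (fun p => pvCanon p == k)).length : Int)))).sum := by
  unfold count_bp_alt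
  simp only []
  have hkeys : (l2.foldl (fun d p =>
      d.modify (pvCanon p) ([], []) (fun g => (g.1, PySem.Set.add g.2 p)))
        (l1.foldl (fun d p =>
          d.modify (pvCanon p) ([], []) (fun g => (PySem.Set.add g.1 p, g.2)))
          (PySem.Dict.empty))).keys
      = PySem.Set.ofList (l1.map pvCanon ++ l2.map pvCanon) := by
    rw [PySem.Dict.keys_foldl_modify_key l2 pvCanon ([], []) (fun _ p g => (g.1, PySem.Set.add g.2 p)),
        PySem.Dict.keys_foldl_modify_key l1 pvCanon ([], []) (fun _ p g => (PySem.Set.add g.1 p, g.2)),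
        PySem.Dict.keys_empty, PySem.Set.update_nil_left, PySem.Set.ofList_append]
  have hnodup : (l2.foldl (fun d p =>
      d.modify (pvCanon p) ([], []) (fun g => (g.1, PySem.Set.add g.2 p)))
        (l1.foldl (fun d p =>
          d.modify (pvCanon p) ([], []) (fun g => (PySem.Set.add g.1 p, g.2)))
          (PySem.Dict.empty))).keys.Nodup := by
    rw [hkeys]; exact PySem.Set.nodup_ofList _
  rw [PySem.Dict.items_eq_map_keys _ hnodup ([], []), hkeys, List.foldl_map]
  simp only [add_assoc]
  rw [PySem.List.foldl_add]
  rw [zero_add]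
  apply congrArg
  apply List.map_congr_left
  intro k hk
  have hle : k.1 ≤ k.2 := mem_K_le hk
  have hget : (l2.foldl (fun d p =>
      d.modify (pvCanon p) ([], []) (fun g => (g.1, PySem.Set.add g.2 p)))
        (l1.foldl (fun d p =>
          d.modify (pvCanon p) ([], []) (fun g => (PySem.Set.add g.1 p, g.2)))
          (PySem.Dict.empty))).getD k ([], [])
      = (PySem.Set.ofList (l1.filter (fun p => pvCanon p == k)),
         PySem.Set.ofList (l2.filter (fun p => pvCanon p == k))) := by
    rw [getD_build2, getD_build1, PySem.Dict.getD_empty]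
    simp [PySem.Set.update_nil_left]
  rw [hget]
  simp only [PySem.Set.len]
  have e2 : PySem.Set.equal (PySem.Set.ofList (l2.filter (fun p => pvCanon p == k)))
      (PySem.Set.ofList [k, (k.2, k.1)])
      = (decide (k ∈ l2) && decide ((k.2, k.1) ∈ l2)) := by
    rw [Bool.eq_iff_iff]
    simp [equal_both_iff l2 k hle]
  have e1 : PySem.Set.equal (PySem.Set.ofList (l1.filter (fun p => pvCanon p == k)))
      (PySem.Set.ofList [k, (k.2, k.1)])
      = (decide (k ∈ l1) && decide ((k.2, k.1) ∈ l1)) := by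
    rw [Bool.eq_iff_iff]
    simp [equal_both_iff l1 k hle]
  rw [e1, e2, len_ofList_filter, len_ofList_filter]

-- A's side count, as the same sum of per-key contributions
lemma a_side_eq (s t : List (Int × Int)) (l1 l2 : List (Int × Int))
    (hmem : ∀ p ∈ PySem.Set.ofList s,
      pvCanon p ∈ PySem.Set.ofList (l1.map pvCanon ++ l2.map pvCanon)) :
    (((PySem.Set.ofList s).countP (fun p =>
        !(decide ((p.1, p.2) ∈ t)) || !(decide ((p.2, p.1) ∈ t)))) : Int)
    = ((PySem.Set.ofList (l1.map pvCanon ++ l2.map pvCanon)).map (fun k =>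
        (if decide (k ∈ t) && decide ((k.2, k.1) ∈ t) then 0
         else (((PySem.Set.ofList s).filter (fun p => pvCanon p == k)).length : Int)))).sum := by
  have hcp : (PySem.Set.ofList s).countP (fun p =>
        !(decide ((p.1, p.2) ∈ t)) || !(decide ((p.2, p.1) ∈ t)))
      = (PySem.Set.ofList s).countP (fun p =>
        !(decide (pvCanon p ∈ t) && decide (((pvCanon p).2, (pvCanon p).1) ∈ t))) := by
    apply List.countP_congr
    intro p _
    rw [← Bool.not_and, Bool.eq_iff_iff]
    simp only [Bool.not_eq_true', Bool.and_eq_false_iff, decide_eq_false_iff_not]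
    have := pred_via_canon t p
    tauto
  rw [hcp, partition_count (PySem.Set.ofList s)
    (PySem.Set.ofList (l1.map pvCanon ++ l2.map pvCanon)) pvCanon
    (fun k => !(decide (k ∈ t) && decide (((k).2, (k).1) ∈ t)))
    (PySem.Set.nodup_ofList _) hmem]
  apply congrArg
  apply List.map_congr_left
  intro k _
  cases hgk : (decide (k ∈ t) && decide ((k.2, k.1) ∈ t)) <;> simp [hgk]

-- every element of a side has its canonical key in B's key list
lemma hmem1 (l1 l2 : List (Int × Int)) : ∀ p ∈ PySem.Set.ofList l1,
    pvCanon p ∈ PySem.Set.ofList (l1.map pvCanon ++ l2.map pvCanon) := by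
  intro p hp
  rw [PySem.Set.mem_ofList] at hp ⊢
  exact List.mem_append_left _ (List.mem_map_of_mem hp)

lemma hmem2 (l1 l2 : List (Int × Int)) : ∀ p ∈ PySem.Set.ofList l2,
    pvCanon p ∈ PySem.Set.ofList (l1.map pvCanon ++ l2.map pvCanon) := by
  intro p hp
  rw [PySem.Set.mem_ofList] at hp ⊢
  exact List.mem_append_right _ (List.mem_map_of_mem hp)

-- ===== VERDICT (by name: the statement is the Claim_ definition above) =====
theorem count_bp_spec : Claim_equal_count_bp := by
  intro l1 l2 _
  unfold Spec_count_bp count_bp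
  simp only []
  rw [side_countP, side_countP, zero_add, alt_eq,
      a_side_eq l1 l2 l1 l2 (hmem1 l1 l2), a_side_eq l2 l1 l1 l2 (hmem2 l1 l2),
      ← PySem.List.sum_map_add_int]
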